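-- pv_equiv track=rewrite | github.com/AsmaTahir/BioDb2016 | Exercise-2.py | recurrence
-- ===== SOURCE A (Python) =====
-- def recurrence(month,rabbit):
--     if month==1:
--         return 1
--     elif month==2:
--         return rabbit
--     i=recurrence(month-1,rabbit)
--     j=recurrence(month-1,rabbit)
--
--     if month<=4 or month>=40:
--         return i+j
--
--     else:
--         return (i+(j+rabbit))
-- ===== SOURCE B (Python) =====
-- def recurrence(month, rabbit):
--     if month == 1:
--         return 1
--     f = rabbit
--     for m in range(3, month + 1):
--         f = 2 * f + (rabbit if 5 <= m <= 39 else 0)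
--     return f
-- ===== Notes on version B (the rewrite author's own statement) =====
-- stated objective: alternative
-- what changed: replaces the exponential double recursion (two identical recursive calls per level) with a single O(month) iterative loop f = 2*f (+ rabbit for months 5..39); intended as faster, but a timing run could not confirm it (A times out already at month=16, so no large size had enough both-finished inputs)
import Mathlib
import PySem

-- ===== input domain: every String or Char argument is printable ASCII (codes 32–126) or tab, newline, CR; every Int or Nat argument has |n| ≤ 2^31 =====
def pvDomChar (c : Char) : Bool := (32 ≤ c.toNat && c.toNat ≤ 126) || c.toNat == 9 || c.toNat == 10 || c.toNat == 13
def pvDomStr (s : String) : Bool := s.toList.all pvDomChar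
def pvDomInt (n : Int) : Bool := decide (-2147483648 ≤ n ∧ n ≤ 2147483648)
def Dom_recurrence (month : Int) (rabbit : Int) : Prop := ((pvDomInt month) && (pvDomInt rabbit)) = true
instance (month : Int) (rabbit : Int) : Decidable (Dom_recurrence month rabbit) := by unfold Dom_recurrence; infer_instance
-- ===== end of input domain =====

-- B replaces A's double recursion by a single iterative loop (intended as faster; a timing run could not confirm it: A times out on the larger sizes).
-- For month < 1 the Python A recurses forever (RecursionError); Pre_ excludes those inputs.

-- ===== PORT A =====
-- literal port of A's recursion; the 'month < 1' guard only makes the (there diverging) Python total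
def recurrence (month : Int) (rabbit : Int) : Int :=
  if month < 1 then 0
  else if month = 1 then 1
  else if month = 2 then rabbit
  else
    let i := recurrence (month - 1) rabbit
    let j := recurrence (month - 1) rabbit
    if month ≤ 4 ∨ month ≥ 40 then i + j
    else i + (j + rabbit)
termination_by month.toNat
decreasing_by all_goals omega

-- ===== PORT B =====
def recurrence_alt (month : Int) (rabbit : Int) : Int :=
  if month = 1 then 1
  else
    (PySem.List.pyRange 3 (month + 1) 1).foldl
      (fun f m => 2 * f + (if 5 ≤ m ∧ m ≤ 39 then rabbit else 0)) rabbit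

-- ===== PRECONDITION & SPEC =====
-- Pre_ excludes month < 1, where the Python A never returns (RecursionError)
def Pre_recurrence (month : Int) (rabbit : Int) : Prop := 1 ≤ month
instance (month : Int) (rabbit : Int) : Decidable (Pre_recurrence month rabbit) := by unfold Pre_recurrence; infer_instance
def pvWitness_recurrence : Int × Int := (6, 3)

def Spec_recurrence (month : Int) (rabbit : Int) (out : Int) : Prop := out = recurrence_alt month rabbit
instance (month : Int) (rabbit : Int) (out : Int) : Decidable (Spec_recurrence month rabbit out) := by unfold Spec_recurrence; infer_instance

-- ===== CLAIM (what is proved, stated in full; the proofs are below) =====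
def Claim_equal_recurrence : Prop := ∀ (month : Int) (rabbit : Int), Dom_recurrence month rabbit → Pre_recurrence month rabbit → Spec_recurrence month rabbit (recurrence month rabbit)

-- ===== LEMMAS AND PROOFS =====

-- B's loop value at month+1 in terms of its value at month (peel the last range element)
lemma alt_succ (month rabbit : Int) (h : 2 ≤ month) :
    recurrence_alt (month + 1) rabbit =
      2 * recurrence_alt month rabbit + (if 5 ≤ month + 1 ∧ month + 1 ≤ 39 then rabbit else 0) := by
  unfold recurrence_alt
  rw [if_neg (by omega), if_neg (by omega),
      show month + 1 + 1 = (month + 1) + 1 from rfl,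
      PySem.List.pyRange_one_succ_right (by omega : (3:Int) ≤ month + 1),
      List.foldl_append]
  simp

lemma main_lemma : ∀ (n : Nat) (month rabbit : Int), month.toNat = n → 1 ≤ month →
    recurrence month rabbit = recurrence_alt month rabbit := by
  intro n
  induction n using Nat.strong_induction_on with
  | _ n ih =>
    intro month rabbit hn h1
    unfold recurrence
    rw [if_neg (by omega)]
    by_cases h1' : month = 1
    · subst h1'
      simp [recurrence_alt]
    · rw [if_neg h1']
      by_cases h2 : month = 2
      · subst h2
        simp [recurrence_alt, PySem.List.pyRange_one_eq_nil (by omega : (3:Int) ≤ 3)]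
      · rw [if_neg h2]
        have h3 : 2 ≤ month - 1 := by omega
        have hrec : recurrence (month - 1) rabbit = recurrence_alt (month - 1) rabbit :=
          ih (month - 1).toNat (by omega) (month - 1) rabbit rfl (by omega)
        have hstep := alt_succ (month - 1) rabbit h3
        rw [show month - 1 + 1 = month by ring] at hstep
        simp only [hrec, hstep]
        by_cases hb : month ≤ 4 ∨ month ≥ 40
        · rw [if_pos hb, if_neg (by omega)]
          ring
        · rw [if_neg hb, if_pos (by omega)]
          ring

-- ===== VERDICT (by name: the statement is the Claim_ definition above) =====
theorem recurrence_spec : Claim_equal_recurrence := by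
  intro month rabbit _ hpre
  unfold Spec_recurrence
  exact main_lemma month.toNat month rabbit rfl hpre
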